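-- pv_equiv track=rewrite | github.com/NDeeSeee/long-read-single-cell-var-calling | scripts/vcf_to_table.py | best_csq
-- ===== SOURCE A (Python) =====
-- IMPACT_RANK = {'HIGH': 3, 'MODERATE': 2, 'LOW': 1, 'MODIFIER': 0}
--
-- CONSEQUENCE_SUBRANK = {
--     'non_coding_transcript_exon_variant': 5,
--     'non_coding_transcript_variant':      4,
--     '3_prime_UTR_variant':                3,
--     '5_prime_UTR_variant':                3,
--     'intron_variant':                     2,
--     'upstream_gene_variant':              1,
--     'downstream_gene_variant':            1,
--     'regulatory_region_variant':          1,
--     'intergenic_variant':                 0,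
-- }
--
-- def _csq_rank(impact_str, consequence_str):
--     imp = IMPACT_RANK.get(impact_str, 0)
--     sub = CONSEQUENCE_SUBRANK.get(consequence_str.split('&')[0], 0) if imp == 0 else 0
--     return (imp, sub)
--
-- def best_csq(csq_string, fields):
--     """
--     Return the single best CSQ entry as a dict.
--     Prefers canonical + highest (IMPACT, consequence_subrank);
--     falls back to any highest-rank entry.
--     """
--     if not csq_string or not fields:
--         return {}
--
--     can_idx  = fields.index('CANONICAL')   if 'CANONICAL'   in fields else -1
--     imp_idx  = fields.index('IMPACT')      if 'IMPACT'      in fields else -1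
--     cons_idx = fields.index('Consequence') if 'Consequence' in fields else -1
--
--     best_canonical = (None, (-1, -1))
--     best_any       = (None, (-1, -1))
--
--     for entry in csq_string.split(','):
--         vals = entry.split('|')
--         d    = dict(zip(fields, vals + [''] * max(0, len(fields) - len(vals))))
--         imp_str  = d.get('IMPACT', '')
--         cons_str = vals[cons_idx] if cons_idx != -1 and cons_idx < len(vals) else ''
--         rank = _csq_rank(imp_str, cons_str)
--         is_can = can_idx != -1 and can_idx < len(vals) and vals[can_idx] == 'YES'
--         if rank > best_any[1]:
--             best_any = (d, rank)
--         if is_can and rank > best_canonical[1]: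
--             best_canonical = (d, rank)
--
--     chosen = best_canonical[0] if best_canonical[0] else best_any[0]
--     return chosen or {}
-- ===== SOURCE B (Python) =====
-- IMPACT_RANK = {'HIGH': 3, 'MODERATE': 2, 'LOW': 1, 'MODIFIER': 0}
--
-- CONSEQUENCE_SUBRANK = {
--     'non_coding_transcript_exon_variant': 5,
--     'non_coding_transcript_variant':      4,
--     '3_prime_UTR_variant':                3,
--     '5_prime_UTR_variant':                3,
--     'intron_variant':                     2,
--     'upstream_gene_variant':              1,
--     'downstream_gene_variant':            1,
--     'regulatory_region_variant':          1,
--     'intergenic_variant':                 0,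
-- }
--
--
-- def _priority(d, cons_str, is_can):
--     """One bounded integer priority: canonical (+24) outranks impact (6 each)
--     outranks the consequence subrank (< 6, counted only for MODIFIER/unknown impact)."""
--     imp = IMPACT_RANK.get(d.get('IMPACT', ''), 0)
--     sub = CONSEQUENCE_SUBRANK.get(cons_str.split('&')[0], 0) if imp == 0 else 0
--     return (24 if is_can else 0) + 6 * imp + sub
--
--
-- def best_csq(csq_string, fields):
--     """Score every CSQ entry with a single integer priority, stably sort the
--     scored entries descending, and return the dict of the top one."""
--     if not csq_string or not fields:
--         return {}
--
--     can_idx  = fields.index('CANONICAL')   if 'CANONICAL'   in fields else -1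
--     cons_idx = fields.index('Consequence') if 'Consequence' in fields else -1
--
--     scored = []
--     for entry in csq_string.split(','):
--         vals = entry.split('|')
--         d = dict(zip(fields, vals + [''] * max(0, len(fields) - len(vals))))
--         cons_str = vals[cons_idx] if cons_idx != -1 and cons_idx < len(vals) else ''
--         is_can = can_idx != -1 and can_idx < len(vals) and vals[can_idx] == 'YES'
--         scored.append((_priority(d, cons_str, is_can), d))
--
--     scored.sort(key=lambda p: p[0], reverse=True)
--     return scored[0][1]
-- ===== Notes on version B (the rewrite author's own statement) =====
-- stated objective: alternative
-- what changed: Replaces A's single pass with two (best, rank-tuple) accumulators and tuple comparisons by a scoring-then-sorting scheme: each entry gets one bounded integer priority (canonical +24 dominates impact*6 dominates consequence subrank), the scored list is stably sorted descending, and the top entry's dict is returned.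
import Mathlib
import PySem

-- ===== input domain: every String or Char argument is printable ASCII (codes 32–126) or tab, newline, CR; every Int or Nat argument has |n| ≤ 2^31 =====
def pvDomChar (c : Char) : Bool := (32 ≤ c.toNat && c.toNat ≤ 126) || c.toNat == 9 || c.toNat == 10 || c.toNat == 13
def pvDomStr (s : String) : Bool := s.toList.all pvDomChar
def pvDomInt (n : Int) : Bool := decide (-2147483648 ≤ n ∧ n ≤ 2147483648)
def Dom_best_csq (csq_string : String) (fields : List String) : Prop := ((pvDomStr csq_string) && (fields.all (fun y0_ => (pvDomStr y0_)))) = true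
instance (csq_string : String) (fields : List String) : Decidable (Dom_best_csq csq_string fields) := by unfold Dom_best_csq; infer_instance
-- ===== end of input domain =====

-- B replaces A's single pass with two (best, rank-tuple) accumulators by scoring-then-sorting:
-- each entry gets one bounded integer priority (canonical bit dominates impact dominates
-- consequence subrank), the scored list is stably sorted descending, the top dict is returned.

-- shared module constants / helper (_csq_rank), used by both Pythons
def pvIMPACT_RANK : PySem.Dict String Int :=
  PySem.Dict.ofList [("HIGH", 3), ("MODERATE", 2), ("LOW", 1), ("MODIFIER", 0)]

def pvCONSEQUENCE_SUBRANK : PySem.Dict String Int :=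
  PySem.Dict.ofList [("non_coding_transcript_exon_variant", 5), ("non_coding_transcript_variant", 4),
    ("3_prime_UTR_variant", 3), ("5_prime_UTR_variant", 3), ("intron_variant", 2),
    ("upstream_gene_variant", 1), ("downstream_gene_variant", 1), ("regulatory_region_variant", 1),
    ("intergenic_variant", 0)]

def pvCsqRank (impact_str consequence_str : String) : Int × Int :=
  let imp := pvIMPACT_RANK.getD impact_str 0
  let sub := if imp == 0 then
      pvCONSEQUENCE_SUBRANK.getD (((PySem.Str.split? consequence_str "&").getD []).headD "") 0
    else 0
  (imp, sub)

-- ===== PORT A =====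
-- Python tuple comparison rank > best : lexicographic strict greater
def pvRankGt (a b : Int × Int) : Bool :=
  decide (b.1 < a.1) || ((a.1 == b.1) && decide (b.2 < a.2))

-- the per-entry values A's loop body computes: (d, rank, is_can)
def pvEntryRecA (fields : List String) (can_idx cons_idx : Int) (entry : String) :
    PySem.Dict String String × (Int × Int) × Bool :=
  let vals := (PySem.Str.split? entry "|").getD []
  let d := PySem.Dict.ofList (fields.zip (vals ++ List.replicate (fields.length - vals.length) ""))
  let imp_str := d.getD "IMPACT" ""
  let cons_str := if cons_idx != -1 && decide (cons_idx < (vals.length : Int)) then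
      PySem.List.pyGetD vals cons_idx "" else ""
  let rank := pvCsqRank imp_str cons_str
  let is_can := can_idx != -1 && decide (can_idx < (vals.length : Int)) &&
      (PySem.List.pyGetD vals can_idx "" == "YES")
  (d, rank, is_can)

-- A's loop body: update (best_canonical, best_any)
def pvStepA (st : (Option (PySem.Dict String String) × (Int × Int)) × (Option (PySem.Dict String String) × (Int × Int)))
    (r : PySem.Dict String String × (Int × Int) × Bool) :
    (Option (PySem.Dict String String) × (Int × Int)) × (Option (PySem.Dict String String) × (Int × Int)) :=
  let ba := if pvRankGt r.2.1 st.2.2 then (some r.1, r.2.1) else st.2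
  let bc := if r.2.2 && pvRankGt r.2.1 st.1.2 then (some r.1, r.2.1) else st.1
  (bc, ba)

-- Python truthiness of `best_canonical[0]` (None or a dict)
def pvTruthy (o : Option (PySem.Dict String String)) : Bool :=
  match o with
  | none => false
  | some d => !d.items.isEmpty

def best_csq (csq_string : String) (fields : List String) : List (String × String) :=
  if csq_string == "" || fields.isEmpty then [] else
  let can_idx : Int := match PySem.List.index? fields "CANONICAL" with | some k => (k : Int) | none => -1
  let imp_idx : Int := match PySem.List.index? fields "IMPACT" with | some k => (k : Int) | none => -1
  let cons_idx : Int := match PySem.List.index? fields "Consequence" with | some k => (k : Int) | none => -1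
  let _ := imp_idx  -- computed by A but never used
  let entries := (PySem.Str.split? csq_string ",").getD []
  let st := entries.foldl (fun st entry => pvStepA st (pvEntryRecA fields can_idx cons_idx entry))
      ((none, (-1, -1)), (none, (-1, -1)))
  let chosen := if pvTruthy st.1.1 then st.1.1 else st.2.1
  match chosen with
  | some d => d.items
  | none => []

-- ===== PORT B =====
-- Source B's _priority: one bounded integer priority per entry
def pvPriority (d : PySem.Dict String String) (cons_str : String) (is_can : Bool) : Int :=
  let imp := pvIMPACT_RANK.getD (d.getD "IMPACT" "") 0
  let sub := if imp == 0 then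
      pvCONSEQUENCE_SUBRANK.getD (((PySem.Str.split? cons_str "&").getD []).headD "") 0
    else 0
  (if is_can then 24 else 0) + 6 * imp + sub

-- B's loop body: build the (priority, dict) pair of one entry
def pvScoredB (fields : List String) (can_idx cons_idx : Int) (entry : String) :
    Int × PySem.Dict String String :=
  let vals := (PySem.Str.split? entry "|").getD []
  let d := PySem.Dict.ofList (fields.zip (vals ++ List.replicate (fields.length - vals.length) ""))
  let cons_str := if cons_idx != -1 && decide (cons_idx < (vals.length : Int)) then
      PySem.List.pyGetD vals cons_idx "" else ""
  let is_can := can_idx != -1 && decide (can_idx < (vals.length : Int)) &&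
      (PySem.List.pyGetD vals can_idx "" == "YES")
  (pvPriority d cons_str is_can, d)

def best_csq_alt (csq_string : String) (fields : List String) : List (String × String) :=
  if csq_string == "" || fields.isEmpty then [] else
  let can_idx : Int := match PySem.List.index? fields "CANONICAL" with | some k => (k : Int) | none => -1
  let cons_idx : Int := match PySem.List.index? fields "Consequence" with | some k => (k : Int) | none => -1
  let scored := ((PySem.Str.split? csq_string ",").getD []).map (pvScoredB fields can_idx cons_idx)
  -- scored.sort(key=..., reverse=True); scored[0][1]  (split always yields ≥ 1 entry, so the [] arm is unreachable)
  match PySem.List.sorted scored (fun p => p.1) true with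
  | p :: _ => p.2.items
  | [] => []

-- ===== PRECONDITION & SPEC =====
def Spec_best_csq (csq_string : String) (fields : List String) (out : List (String × String)) : Prop := out = best_csq_alt csq_string fields
instance (csq_string : String) (fields : List String) (out : List (String × String)) : Decidable (Spec_best_csq csq_string fields out) := by unfold Spec_best_csq; infer_instance

-- ===== CLAIM (what is proved, stated in full; the proofs are below) =====
def Claim_equal_best_csq : Prop := ∀ (csq_string : String) (fields : List String), Dom_best_csq csq_string fields → Spec_best_csq csq_string fields (best_csq csq_string fields)

-- ===== LEMMAS AND PROOFS =====

-- abbreviations used only by the proofs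
abbrev PvRec := PySem.Dict String String × (Int × Int) × Bool
abbrev PvBest := Option (PySem.Dict String String) × (Int × Int)

-- A's lexicographic first-maximum fold step
def pvM (acc : Option PvRec) (x : PvRec) : Option PvRec :=
  match acc with
  | none => some x
  | some m =>
    if (decide (m.2.1.1 < x.2.1.1) || (!decide (x.2.1.1 < m.2.1.1) && decide (m.2.1.2 < x.2.1.2))) then
      some x else some m

def pvStepB (ba : PvBest) (r : PvRec) : PvBest :=
  if pvRankGt r.2.1 ba.2 then (some r.1, r.2.1) else ba

def pvStepC (bc : PvBest) (r : PvRec) : PvBest :=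
  if r.2.2 && pvRankGt r.2.1 bc.2 then (some r.1, r.2.1) else bc

-- B's scalar key of a record
def pvKey (r : PvRec) : Int := (if r.2.2 then 24 else 0) + 6 * r.2.1.1 + r.2.1.2

-- generic first-maximum fold step for an Int key
def pvFirstMax {α : Type} (key : α → Int) (m : Option α) (x : α) : Option α :=
  match m with
  | none => some x
  | some m => if key m < key x then some x else some m

-- B's scalar first-maximum fold step on records
def pvFM (m : Option PvRec) (r : PvRec) : Option PvRec :=
  match m with
  | none => some r
  | some m => if pvKey m < pvKey r then some r else some m

-- bounds that make the scalar key order the lexicographic rank order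
def pvWF (r : PvRec) : Prop :=
  0 ≤ r.2.1.1 ∧ r.2.1.1 ≤ 3 ∧ 0 ≤ r.2.1.2 ∧ r.2.1.2 ≤ 5

lemma pvRankGt_eq (a b : Int × Int) :
    pvRankGt a b = (decide (b.1 < a.1) || (!decide (a.1 < b.1) && decide (b.2 < a.2))) := by
  unfold pvRankGt
  by_cases h1 : b.1 < a.1 <;> by_cases h2 : a.1 < b.1 <;> by_cases h3 : a.1 = b.1 <;>
    simp_all <;> omega

lemma pvFoldl_pair (rs : List PvRec) (a b : PvBest) :
    rs.foldl pvStepA (a, b) = (rs.foldl pvStepC a, rs.foldl pvStepB b) := by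
  induction rs generalizing a b with
  | nil => rfl
  | cons r t ih => exact ih _ _

lemma pvFoldl_filter (rs : List PvRec) (s : PvBest) :
    rs.foldl pvStepC s = (rs.filter (fun r => r.2.2)).foldl pvStepB s := by
  induction rs generalizing s with
  | nil => rfl
  | cons r t ih =>
    cases hr : r.2.2 <;> simp [List.foldl, List.filter_cons, hr, pvStepC, pvStepB, ih]

lemma pvFoldl_some (rs : List PvRec) (m : PvRec) :
    rs.foldl pvStepB (some m.1, m.2.1) =
      (match rs.foldl pvM (some m) with
       | none => ((none : Option (PySem.Dict String String)), ((-1 : Int), (-1 : Int)))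
       | some m' => (some m'.1, m'.2.1)) := by
  induction rs generalizing m with
  | nil => rfl
  | cons r t ih =>
    have hc := pvRankGt_eq r.2.1 m.2.1
    simp only [List.foldl]
    cases h : (decide (m.2.1.1 < r.2.1.1) || (!decide (r.2.1.1 < m.2.1.1) && decide (m.2.1.2 < r.2.1.2))) with
    | true => simp [pvStepB, pvM, hc, h, ih r]
    | false => simp [pvStepB, pvM, hc, h, ih m]

lemma pvFoldl_any (rs : List PvRec) (h : ∀ r ∈ rs, pvRankGt r.2.1 (-1, -1) = true) :
    rs.foldl pvStepB ((none : Option (PySem.Dict String String)), ((-1 : Int), (-1 : Int))) =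
      (match rs.foldl pvM none with
       | none => ((none : Option (PySem.Dict String String)), ((-1 : Int), (-1 : Int)))
       | some m' => (some m'.1, m'.2.1)) := by
  cases rs with
  | nil => rfl
  | cons r t =>
    have hr : pvRankGt r.2.1 (-1, -1) = true := h r (List.mem_cons_self)
    simp only [List.foldl]
    have h1 : pvStepB (none, (-1, -1)) r = (some r.1, r.2.1) := by simp [pvStepB, hr]
    have h2 : pvM none r = some r := rfl
    rw [h1, h2, pvFoldl_some]

lemma pvM_isSome (rs : List PvRec) (m : PvRec) : (rs.foldl pvM (some m)).isSome := by
  induction rs generalizing m with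
  | nil => rfl
  | cons r t ih =>
    simp only [List.foldl, pvM]
    split <;> exact ih _

lemma pvM_mem (rs : List PvRec) (m m' : PvRec) (h : rs.foldl pvM (some m) = some m') :
    m' = m ∨ m' ∈ rs := by
  induction rs generalizing m with
  | nil => exact Or.inl (by simpa using h.symm)
  | cons r t ih =>
    simp only [List.foldl, pvM] at h
    split at h
    · rcases ih _ h with h' | h'
      · exact Or.inr (h' ▸ List.mem_cons_self)
      · exact Or.inr (List.mem_cons_of_mem _ h')
    · rcases ih _ h with h' | h'
      · exact Or.inl h'
      · exact Or.inr (List.mem_cons_of_mem _ h')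

lemma pvImpact_bounds (s : String) :
    (0 : Int) ≤ pvIMPACT_RANK.getD s 0 ∧ pvIMPACT_RANK.getD s 0 ≤ 3 := by
  have h : pvIMPACT_RANK = PySem.Dict.mk [("HIGH", 3), ("MODERATE", 2), ("LOW", 1), ("MODIFIER", 0)] := by rfl
  rw [h]
  simp only [PySem.Dict.getD, PySem.Dict.get?_mk_cons]
  split_ifs <;> simp [PySem.Dict.get?] <;> omega

lemma pvSub_bounds (s : String) :
    (0 : Int) ≤ pvCONSEQUENCE_SUBRANK.getD s 0 ∧ pvCONSEQUENCE_SUBRANK.getD s 0 ≤ 5 := by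
  have h : pvCONSEQUENCE_SUBRANK = PySem.Dict.mk [("non_coding_transcript_exon_variant", 5),
    ("non_coding_transcript_variant", 4), ("3_prime_UTR_variant", 3), ("5_prime_UTR_variant", 3),
    ("intron_variant", 2), ("upstream_gene_variant", 1), ("downstream_gene_variant", 1),
    ("regulatory_region_variant", 1), ("intergenic_variant", 0)] := by rfl
  rw [h]
  simp only [PySem.Dict.getD, PySem.Dict.get?_mk_cons]
  split_ifs <;> simp [PySem.Dict.get?] <;> omega

lemma pvCsqRank_wf (i c : String) :
    0 ≤ (pvCsqRank i c).1 ∧ (pvCsqRank i c).1 ≤ 3 ∧ 0 ≤ (pvCsqRank i c).2 ∧ (pvCsqRank i c).2 ≤ 5 := by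
  unfold pvCsqRank
  have h1 := pvImpact_bounds i
  have h2 := pvSub_bounds (((PySem.Str.split? c "&").getD []).headD "")
  refine ⟨h1.1, h1.2, ?_, ?_⟩ <;> simp only [] <;> split_ifs <;> omega

lemma pvEntryRecA_wf (fields : List String) (ci ki : Int) (e : String) :
    pvWF (pvEntryRecA fields ci ki e) := by
  unfold pvEntryRecA pvWF
  exact pvCsqRank_wf _ _

lemma pvRank_gt_init (i c : String) : pvRankGt (pvCsqRank i c) (-1, -1) = true := by
  have h := (pvImpact_bounds i).1
  have h1 : ((-1, -1) : Int × Int).1 < (pvCsqRank i c).1 := by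
    show (-1 : Int) < pvIMPACT_RANK.getD i 0
    omega
  unfold pvRankGt
  simp [h1]

lemma pvInsert_items_ne_nil {κ ν : Type} [BEq κ] (d : PySem.Dict κ ν) (k : κ) (v : ν) :
    (d.insert k v).items ≠ [] := by
  unfold PySem.Dict.insert
  split
  · rename_i hcon
    simp only [PySem.Dict.contains, List.any_eq_true] at hcon
    obtain ⟨p, hp, -⟩ := hcon
    intro he
    simp only [List.map_eq_nil_iff] at he
    rw [he] at hp
    exact absurd hp (List.not_mem_nil)
  · simp

lemma pvFoldl_insert_ne_nil {κ ν : Type} [BEq κ] (l : List (κ × ν)) (d : PySem.Dict κ ν)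
    (hd : d.items ≠ []) :
    (List.foldl (fun acc p => acc.insert p.1 p.2) d l).items ≠ [] := by
  induction l generalizing d with
  | nil => exact hd
  | cons p t ih => exact ih _ (pvInsert_items_ne_nil d p.1 p.2)

lemma pvOfList_ne_nil {κ ν : Type} [BEq κ] (l : List (κ × ν)) (hl : l ≠ []) :
    (PySem.Dict.ofList l).items ≠ [] := by
  cases l with
  | nil => exact absurd rfl hl
  | cons p t =>
    show (List.foldl (fun acc p => acc.insert p.1 p.2) (PySem.Dict.empty.insert p.1 p.2) t).items ≠ []
    exact pvFoldl_insert_ne_nil t _ (pvInsert_items_ne_nil _ _ _)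

lemma pvRec_dict_ne_nil (fields : List String) (ci ki : Int) (e : String) (hf : fields ≠ []) :
    (pvEntryRecA fields ci ki e).1.items ≠ [] := by
  unfold pvEntryRecA
  apply pvOfList_ne_nil
  cases fields with
  | nil => exact absurd rfl hf
  | cons f fs =>
    set vals := (PySem.Str.split? e "|").getD [] with hv
    cases hvals : vals with
    | nil => simp [List.zip, hvals]
    | cons x xs => simp [List.zip, hvals]

-- the scalar key decides the lexicographic comparison on well-formed records with equal flag
lemma pvKey_decides (m x : PvRec) (hm : pvWF m) (hx : pvWF x) (hflag : m.2.2 = x.2.2) :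
    (decide (m.2.1.1 < x.2.1.1) || (!decide (x.2.1.1 < m.2.1.1) && decide (m.2.1.2 < x.2.1.2))) =
      decide (pvKey m < pvKey x) := by
  obtain ⟨a1, a2, a3, a4⟩ := hm
  obtain ⟨b1, b2, b3, b4⟩ := hx
  unfold pvKey
  rw [hflag]
  by_cases h1 : m.2.1.1 < x.2.1.1 <;> by_cases h2 : x.2.1.1 < m.2.1.1 <;>
    by_cases h3 : m.2.1.2 < x.2.1.2 <;> simp [h1, h2, h3] <;> split_ifs <;> omega

lemma pvKey_noncan_lt_can (m x : PvRec) (hm : pvWF m) (hx : pvWF x)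
    (hmf : m.2.2 = false) (hxf : x.2.2 = true) : pvKey m < pvKey x := by
  obtain ⟨a1, a2, a3, a4⟩ := hm
  obtain ⟨b1, b2, b3, b4⟩ := hx
  unfold pvKey
  rw [hmf, hxf]
  simp only [if_true, Bool.false_eq_true, if_false]
  omega

-- once the accumulator is canonical, the scalar fold is the lex fold over the canonical records
lemma pvFM_can_acc (l : List PvRec) (m : PvRec)
    (hl : ∀ r ∈ l, pvWF r) (hm : pvWF m) (hmf : m.2.2 = true) :
    l.foldl pvFM (some m) = (l.filter (fun r => r.2.2)).foldl pvM (some m) := by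
  induction l generalizing m with
  | nil => rfl
  | cons x t ih =>
    have hx := hl x List.mem_cons_self
    have ht : ∀ r ∈ t, pvWF r := fun r hr => hl r (List.mem_cons_of_mem _ hr)
    cases hxf : x.2.2 with
    | true =>
      have hk := pvKey_decides m x hm hx (by rw [hmf, hxf])
      by_cases h : pvKey m < pvKey x
      · simp only [List.foldl, List.filter_cons, hxf, if_true, pvFM, pvM, hk, h, decide_true]
        exact ih x ht hx hxf
      · simp only [List.foldl, List.filter_cons, hxf, if_true, pvFM, pvM, hk, h, decide_false,
          Bool.false_eq_true, if_false]
        exact ih m ht hm hmf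
    | false =>
      have hlt : ¬ pvKey m < pvKey x := by
        have := pvKey_noncan_lt_can x m hx hm hxf hmf
        omega
      simp only [List.foldl, List.filter_cons, hxf, pvFM, if_neg hlt]
      simpa using ih m ht hm hmf

-- with a non-canonical accumulator: lex fold over all if no canonical record, else over the canonical ones
lemma pvFM_noncan_acc (l : List PvRec) (m : PvRec)
    (hl : ∀ r ∈ l, pvWF r) (hm : pvWF m) (hmf : m.2.2 = false) :
    l.foldl pvFM (some m) =
      (if (l.filter (fun r => r.2.2)).isEmpty then l.foldl pvM (some m)
       else (l.filter (fun r => r.2.2)).foldl pvM none) := by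
  induction l generalizing m with
  | nil => rfl
  | cons x t ih =>
    have hx := hl x List.mem_cons_self
    have ht : ∀ r ∈ t, pvWF r := fun r hr => hl r (List.mem_cons_of_mem _ hr)
    cases hxf : x.2.2 with
    | true =>
      have hlt : pvKey m < pvKey x := pvKey_noncan_lt_can m x hm hx hmf hxf
      simp only [List.foldl, List.filter_cons, hxf, if_true, pvFM, if_pos hlt,
        List.isEmpty_cons, Bool.false_eq_true, if_false]
      rw [pvFM_can_acc t x ht hx hxf]
      rfl
    | false =>
      simp only [List.foldl, List.filter_cons, hxf, pvFM, pvM]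
      have hk := pvKey_decides m x hm hx (by rw [hmf, hxf])
      by_cases h : pvKey m < pvKey x
      · simp only [hk, h, decide_true, if_true]
        exact ih x ht hx hxf
      · simp only [hk, h, decide_false, Bool.false_eq_true, if_false]
        exact ih m ht hm hmf

-- head of Python's stable descending sort = first-maximum fold (scalar Int key)
lemma pvHead_foldl_insertBy {α : Type} (key : α → Int) (xs : List α) (acc : List α) :
    (xs.foldl (fun acc x => PySem.List.insertBy (fun a b => decide (key b < key a)) x acc) acc).head? =
      xs.foldl (pvFirstMax key) acc.head? := by
  induction xs generalizing acc with
  | nil => rfl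
  | cons x t ih =>
    simp only [List.foldl]
    rw [ih]
    congr 1
    cases acc with
    | nil => rfl
    | cons y ys =>
      simp only [PySem.List.insertBy, pvFirstMax]
      by_cases h : key y < key x
      · simp [h]
      · simp [h]

lemma pvHead_sorted {α : Type} (key : α → Int) (xs : List α) :
    (PySem.List.sorted xs key true).head? = xs.foldl (pvFirstMax key) none := by
  rw [PySem.List.sorted_rev_eq_foldl_insertBy, pvHead_foldl_insertBy key xs []]
  rfl

-- the pair fold over the scored list is the record fold, projected
lemma pvScored_fold (recs : List PvRec) (m : Option PvRec) :
    (recs.map (fun r => (pvKey r, r.1))).foldl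
        (pvFirstMax (fun p => (p : Int × PySem.Dict String String).1))
        (m.map (fun r => (pvKey r, r.1))) =
      (recs.foldl pvFM m).map (fun r => (pvKey r, r.1)) := by
  induction recs generalizing m with
  | nil => rfl
  | cons r t ih =>
    rw [List.map_cons, List.foldl_cons, List.foldl_cons]
    have hstep : pvFirstMax (fun p => (p : Int × PySem.Dict String String).1)
          (m.map (fun r : PvRec => (pvKey r, r.1))) (pvKey r, r.1) =
        (pvFM m r).map (fun r => (pvKey r, r.1)) := by
      cases m with
      | none => rfl
      | some q =>
        simp only [Option.map, pvFM, pvFirstMax]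
        by_cases h : pvKey q < pvKey r
        · simp [h]
        · simp [h]
    rw [hstep]
    exact ih (pvFM m r)

-- the scored builder is the A-record builder projected through (pvKey, dict)
lemma pvScoredB_eq (fields : List String) (ci ki : Int) (e : String) :
    pvScoredB fields ci ki e =
      (pvKey (pvEntryRecA fields ci ki e), (pvEntryRecA fields ci ki e).1) := by
  unfold pvScoredB pvEntryRecA pvPriority pvCsqRank pvKey
  rfl

lemma pvCore (fields : List String) (ci ki : Int) (entries : List String) (hf : fields ≠ []) :
    (let st := entries.foldl (fun st entry => pvStepA st (pvEntryRecA fields ci ki entry))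
        ((none, (-1, -1)), (none, (-1, -1)));
     let chosen := if pvTruthy st.1.1 then st.1.1 else st.2.1;
     match chosen with
     | some d => d.items
     | none => ([] : List (String × String))) =
    (let scored := entries.map (pvScoredB fields ci ki);
     match PySem.List.sorted scored (fun p => p.1) true with
     | p :: _ => p.2.items
     | [] => ([] : List (String × String))) := by
  -- A side: reduce to the lex fold over canonical-or-all records
  rw [show entries.foldl (fun st entry => pvStepA st (pvEntryRecA fields ci ki entry))
        ((none, (-1, -1)), (none, (-1, -1)))
      = (entries.map (pvEntryRecA fields ci ki)).foldl pvStepA ((none, (-1, -1)), (none, (-1, -1)))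
    from (List.foldl_map ..).symm]
  set recs := entries.map (pvEntryRecA fields ci ki) with hrecs
  have hwf : ∀ r ∈ recs, pvWF r := by
    intro r hr
    rw [hrecs] at hr
    obtain ⟨e, -, rfl⟩ := List.mem_map.mp hr
    exact pvEntryRecA_wf fields ci ki e
  have hrank : ∀ r ∈ recs, pvRankGt r.2.1 (-1, -1) = true := by
    intro r hr
    rw [hrecs] at hr
    obtain ⟨e, -, rfl⟩ := List.mem_map.mp hr
    exact pvRank_gt_init _ _
  have hdict : ∀ r ∈ recs, (r : PvRec).1.items ≠ [] := by
    intro r hr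
    rw [hrecs] at hr
    obtain ⟨e, -, rfl⟩ := List.mem_map.mp hr
    exact pvRec_dict_ne_nil fields ci ki e hf
  -- B side: head of the sort = scalar first-max fold over recs
  have hb : (let scored := entries.map (pvScoredB fields ci ki);
      match PySem.List.sorted scored (fun p => p.1) true with
      | p :: _ => p.2.items
      | [] => ([] : List (String × String))) =
      (match recs.foldl pvFM none with
       | some r => r.1.items
       | none => ([] : List (String × String))) := by
    have hmap : entries.map (pvScoredB fields ci ki) = recs.map (fun r => (pvKey r, r.1)) := by
      rw [hrecs, List.map_map]
      exact List.map_congr_left (fun e _ => pvScoredB_eq fields ci ki e)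
    have hh := pvHead_sorted (fun p => (p : Int × PySem.Dict String String).1)
        (recs.map (fun r => (pvKey r, r.1)))
    have hsf := pvScored_fold recs none
    simp only [Option.map_none] at hsf
    rw [hsf] at hh
    simp only [hmap]
    cases hs : PySem.List.sorted (recs.map (fun r => (pvKey r, r.1)))
        (fun p => (p : Int × PySem.Dict String String).1) true with
    | nil =>
      rw [hs] at hh
      simp only [List.head?] at hh
      cases hfm : recs.foldl pvFM none with
      | none => rfl
      | some r => rw [hfm] at hh; simp at hh
    | cons p t =>
      rw [hs] at hh
      simp only [List.head?] at hh
      cases hfm : recs.foldl pvFM none with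
      | none => rw [hfm] at hh; simp at hh
      | some r =>
        rw [hfm] at hh
        simp only [Option.map] at hh
        have hp : p = (pvKey r, r.1) := by simpa using hh
        rw [hp]
  rw [hb]
  -- connect the two folds
  rw [pvFoldl_pair, pvFoldl_filter]
  set canonical := recs.filter (fun r => r.2.2) with hcan
  have hrankC : ∀ r ∈ canonical, pvRankGt r.2.1 (-1, -1) = true := by
    intro r hr
    exact hrank r (List.mem_of_mem_filter hr)
  rw [pvFoldl_any canonical hrankC, pvFoldl_any recs hrank]
  have hfm : recs.foldl pvFM none =
      (if canonical.isEmpty then recs.foldl pvM none else canonical.foldl pvM none) := by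
    cases hr0 : recs with
    | nil => simp [hcan, hr0]
    | cons r t =>
      have hr : pvWF r := hwf r (by rw [hr0]; exact List.mem_cons_self)
      have ht : ∀ x ∈ t, pvWF x := fun x hx => hwf x (by rw [hr0]; exact List.mem_cons_of_mem _ hx)
      cases hrf : r.2.2 with
      | true =>
        simp only [hcan, hr0, List.foldl_cons, List.filter_cons, hrf, if_true,
          List.isEmpty_cons, Bool.false_eq_true, if_false]
        have h2 : pvFM none r = some r := rfl
        have h3 : pvM none r = some r := rfl
        rw [h2, h3]
        exact pvFM_can_acc t r ht hr hrf
      | false =>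
        simp only [hcan, hr0, List.foldl_cons, List.filter_cons, hrf, Bool.false_eq_true, if_false]
        have h2 : pvFM none r = some r := rfl
        have h3 : pvM none r = some r := rfl
        rw [h2, h3]
        exact pvFM_noncan_acc t r ht hr hrf
  rw [hfm]
  cases hce : canonical with
  | nil =>
    simp only [List.isEmpty_nil, if_true, pvTruthy]
    cases hma : recs.foldl pvM none with
    | none => rfl
    | some m => rfl
  | cons c cs =>
    simp only [List.isEmpty_cons, Bool.false_eq_true, if_false, List.foldl_cons]
    have h2 : pvM none c = some c := rfl
    rw [h2]
    cases hmc : cs.foldl pvM (some c) with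
    | none => exact absurd (congrArg Option.isSome hmc) (by simp [pvM_isSome])
    | some m =>
      have hmem : m ∈ canonical := by
        rcases pvM_mem cs c m hmc with h' | h'
        · rw [hce, h']; exact List.mem_cons_self
        · rw [hce]; exact List.mem_cons_of_mem _ h'
      have hne : m.1.items ≠ [] := hdict m (List.mem_of_mem_filter (hcan ▸ hmem))
      simp only [pvTruthy]
      rw [if_pos (by simpa using hne)]

-- ===== VERDICT (by name: the statement is the Claim_ definition above) =====
theorem best_csq_spec : Claim_equal_best_csq := by
  intro csq_string fields _
  show best_csq csq_string fields = best_csq_alt csq_string fields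
  unfold best_csq best_csq_alt
  cases hg : (csq_string == "" || fields.isEmpty) with
  | true => simp [hg]
  | false =>
    simp only [hg, Bool.false_eq_true, if_false]
    have hf : fields ≠ [] := by
      intro h
      rw [h] at hg
      simp at hg
    exact pvCore fields
      (match PySem.List.index? fields "CANONICAL" with | some k => (k : Int) | none => -1)
      (match PySem.List.index? fields "Consequence" with | some k => (k : Int) | none => -1)
      ((PySem.Str.split? csq_string ",").getD []) hf
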